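-- pv_equiv track=rewrite | github.com/Gentlemath/FirstMove | backend/app/services/workspace_task_builder.py | _order_items_by_task_index
-- ===== SOURCE A (Python) =====
-- from typing import Any, Literal, cast
--
-- def _order_items_by_task_index(
--     items: list[dict[str, Any]],
--     expected_count: int,
-- ) -> list[dict[str, Any]]:
--     indexes = [item.get("task_index") for item in items]
--     if not all(isinstance(index, int) for index in indexes):
--         return items
--
--     integer_indexes = cast(list[int], indexes)
--     if set(integer_indexes) != set(range(1, expected_count + 1)):
--         return items
--
--     return sorted(items, key=lambda item: cast(int, item["task_index"]))
-- ===== SOURCE B (Python) =====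
-- from typing import Any
--
--
-- def _order_items_by_task_index(
--     items: list[dict[str, Any]],
--     expected_count: int,
-- ) -> list[dict[str, Any]]:
--     # One pass: bucket items by task_index, then emit buckets for 1..expected_count.
--     buckets: dict[int, list[dict[str, Any]]] = {}
--     for item in items:
--         index = item.get("task_index")
--         if not isinstance(index, int):
--             return items
--         buckets.setdefault(index, []).append(item)
--
--     if set(buckets) != set(range(1, expected_count + 1)):
--         return items
--
--     out: list[dict[str, Any]] = []
--     for i in range(1, expected_count + 1):
--         out.extend(buckets[i])
--     return out
-- ===== Notes on version B (the rewrite author's own statement) =====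
-- stated objective: alternative
-- what changed: replaces the map+set-build+comparison sort with one grouping pass that buckets items by task_index and then emits the buckets for 1..expected_count in order (a stable counting sort)
import Mathlib
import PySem

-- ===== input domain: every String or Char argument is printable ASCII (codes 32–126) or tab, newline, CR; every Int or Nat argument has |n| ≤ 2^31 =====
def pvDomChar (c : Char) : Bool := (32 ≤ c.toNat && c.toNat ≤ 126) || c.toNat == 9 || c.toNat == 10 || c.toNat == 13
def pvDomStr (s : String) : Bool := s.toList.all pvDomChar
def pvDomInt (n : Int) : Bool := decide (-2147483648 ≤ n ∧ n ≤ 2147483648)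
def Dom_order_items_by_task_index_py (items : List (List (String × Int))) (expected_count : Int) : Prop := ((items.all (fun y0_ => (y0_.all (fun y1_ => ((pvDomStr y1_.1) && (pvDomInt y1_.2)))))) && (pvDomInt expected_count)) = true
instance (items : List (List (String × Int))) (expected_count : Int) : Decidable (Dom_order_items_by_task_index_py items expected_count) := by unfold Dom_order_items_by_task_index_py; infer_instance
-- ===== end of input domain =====

-- B replaces A's comparison sort with a single-pass bucket grouping by task_index
-- followed by emitting the buckets for 1..expected_count in order (counting sort).

-- ===== PORT A =====
-- items.get("task_index") on an association-list dict; values are Int, so the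
-- isinstance(int) check is exactly "the key is present" (Option.isSome).
def order_items_by_task_index_py (items : List (List (String × Int))) (expected_count : Int) : List (List (String × Int)) :=
  let indexes := items.map (fun item => (PySem.Dict.mk item).get? "task_index")
  if ¬ (indexes.all (fun o => o.isSome)) then items
  else
    let integer_indexes := indexes.map (fun o => o.getD 0)  -- the cast: all entries proven present
    if ¬ PySem.Set.equal (PySem.Set.ofList integer_indexes)
          (PySem.Set.ofList (PySem.List.pyRange 1 (expected_count + 1) 1)) then items
    else
      -- item["task_index"]: in this branch the key is present, so get? is some; getD 0 reads it
      PySem.List.sorted items (fun item => ((PySem.Dict.mk item).get? "task_index").getD 0) false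

-- ===== PORT B =====
-- one pass: buckets.setdefault(idx, []).append(item); early return (None) if a key is missing
def pvAltBuckets : List (List (String × Int)) → PySem.Dict Int (List (List (String × Int))) →
    Option (PySem.Dict Int (List (List (String × Int))))
  | [], d => some d
  | item :: rest, d =>
    match (PySem.Dict.mk item).get? "task_index" with
    | none => none
    | some idx => pvAltBuckets rest (d.modify idx [] (fun l => l ++ [item]))

def order_items_by_task_index_py_alt (items : List (List (String × Int))) (expected_count : Int) : List (List (String × Int)) :=
  match pvAltBuckets items PySem.Dict.empty with
  | none => items
  | some buckets =>
    if ¬ PySem.Set.equal (PySem.Set.ofList buckets.keys)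
          (PySem.Set.ofList (PySem.List.pyRange 1 (expected_count + 1) 1)) then items
    else
      (PySem.List.pyRange 1 (expected_count + 1) 1).foldl (fun out i => out ++ buckets.getD i []) []

-- ===== PRECONDITION & SPEC =====
def Spec_order_items_by_task_index_py (items : List (List (String × Int))) (expected_count : Int) (out : List (List (String × Int))) : Prop := out = order_items_by_task_index_py_alt items expected_count
instance (items : List (List (String × Int))) (expected_count : Int) (out : List (List (String × Int))) : Decidable (Spec_order_items_by_task_index_py items expected_count out) := by unfold Spec_order_items_by_task_index_py; infer_instance

-- ===== CLAIM (what is proved, stated in full; the proofs are below) =====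
def Claim_equal_order_items_by_task_index_py : Prop := ∀ (items : List (List (String × Int))) (expected_count : Int), Dom_order_items_by_task_index_py items expected_count → Spec_order_items_by_task_index_py items expected_count (order_items_by_task_index_py items expected_count)

-- ===== LEMMAS AND PROOFS =====

-- the sort key both programs read: the value stored under "task_index"
def pvKey (item : List (String × Int)) : Int :=
  ((PySem.Dict.mk item).get? "task_index").getD 0

-- the grouping step B's loop performs once the key is known present
def pvStep (d : PySem.Dict Int (List (List (String × Int)))) (item : List (String × Int)) :
    PySem.Dict Int (List (List (String × Int))) :=
  d.modify (pvKey item) [] (fun l => l ++ [item])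

theorem pvAltBuckets_none (items : List (List (String × Int)))
    (h : ¬ (items.all (fun item => ((PySem.Dict.mk item).get? "task_index").isSome)) = true) :
    ∀ d, pvAltBuckets items d = none := by
  induction items with
  | nil => simp at h
  | cons x xs ih =>
    intro d
    simp only [List.all_cons, Bool.and_eq_true] at h
    cases hx : (PySem.Dict.mk x).get? "task_index" with
    | none => simp [pvAltBuckets, hx]
    | some v =>
      have : ¬ (xs.all (fun item => ((PySem.Dict.mk item).get? "task_index").isSome)) = true := by
        intro hxs; exact h ⟨by simp [hx], hxs⟩
      simp [pvAltBuckets, hx, ih this]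

theorem pvAltBuckets_some (items : List (List (String × Int)))
    (h : (items.all (fun item => ((PySem.Dict.mk item).get? "task_index").isSome)) = true) :
    ∀ d, pvAltBuckets items d = some (items.foldl pvStep d) := by
  induction items with
  | nil => intro d; simp [pvAltBuckets]
  | cons x xs ih =>
    intro d
    simp only [List.all_cons, Bool.and_eq_true] at h
    cases hx : (PySem.Dict.mk x).get? "task_index" with
    | none => simp [hx] at h
    | some v =>
      have hkey : pvKey x = v := by simp [pvKey, hx]
      simp [pvAltBuckets, hx, List.foldl_cons, ih h.2, pvStep, hkey]

-- the bucket under i collects exactly the items with key i, in order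
theorem getD_foldl_pvStep (xs : List (List (String × Int))) :
    ∀ (d : PySem.Dict Int (List (List (String × Int)))) (i : Int),
    (xs.foldl pvStep d).getD i [] = d.getD i [] ++ xs.filter (fun x => pvKey x == i) := by
  induction xs with
  | nil => simp
  | cons x xs ih =>
    intro d i
    rw [List.foldl_cons, ih]
    by_cases hi : i = pvKey x
    · subst hi
      simp [pvStep, PySem.Dict.modify, PySem.Dict.getD_insert_self]
    · have : (pvKey x == i) = false := by simp; omega
      simp [pvStep, PySem.Dict.modify, PySem.Dict.getD_insert_of_ne _ _ _ hi, this]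

-- insert into a partitioned list: skip the not-before block, land before the before block
theorem insertBy_split (before : List (String × Int) → List (String × Int) → Bool)
    (x : List (String × Int)) (A B : List (List (String × Int)))
    (hA : ∀ a ∈ A, before x a = false) (hB : ∀ b ∈ B, before x b = true) :
    PySem.List.insertBy before x (A ++ B) = A ++ x :: B := by
  induction A with
  | nil =>
    cases B with
    | nil => simp [PySem.List.insertBy]
    | cons b bs => simp [PySem.List.insertBy, hB b (by simp)]
  | cons a as ih =>
    have ha := hA a (by simp)
    simp only [List.cons_append, PySem.List.insertBy, ha, Bool.false_eq_true, if_false]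
    rw [ih (fun y hy => hA y (by simp [hy]))]

-- counting-sort correctness: the stable insertion sort equals the concatenation of the
-- per-key blocks taken in strictly increasing key order
theorem csort (ks : List Int) (hks : ks.Pairwise (· < ·)) :
    ∀ (xs p : List (List (String × Int))), (∀ x ∈ xs, pvKey x ∈ ks) →
    xs.foldl (fun acc x => PySem.List.insertBy (fun a b => decide (pvKey a < pvKey b)) x acc)
        (ks.flatMap (fun k => p.filter (fun y => pvKey y == k)))
      = ks.flatMap (fun k => (p ++ xs).filter (fun y => pvKey y == k)) := by
  intro xs
  induction xs with
  | nil => intro p _; simp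
  | cons x xs ih =>
    intro p hcov
    have hx : pvKey x ∈ ks := hcov x (by simp)
    obtain ⟨l₁, l₂, rfl⟩ := List.append_of_mem hx
    rw [List.pairwise_append] at hks
    obtain ⟨h₁, h₂, h₁₂⟩ := hks
    rw [List.pairwise_cons] at h₂
    rw [List.foldl_cons]
    have hsplit :
        PySem.List.insertBy (fun a b => decide (pvKey a < pvKey b)) x
          ((l₁ ++ pvKey x :: l₂).flatMap (fun k => p.filter (fun y => pvKey y == k)))
        = (l₁ ++ pvKey x :: l₂).flatMap (fun k => (p ++ [x]).filter (fun y => pvKey y == k)) := by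
      have hAB : (l₁ ++ pvKey x :: l₂).flatMap (fun k => p.filter (fun y => pvKey y == k))
          = (l₁.flatMap (fun k => p.filter (fun y => pvKey y == k)) ++ p.filter (fun y => pvKey y == pvKey x))
            ++ l₂.flatMap (fun k => p.filter (fun y => pvKey y == k)) := by
        simp [List.flatMap_append]
      rw [hAB, insertBy_split]
      · -- rebuild the flatMap over p ++ [x]
        have hfilt : ∀ k : Int, (p ++ [x]).filter (fun y => pvKey y == k)
            = p.filter (fun y => pvKey y == k) ++ if pvKey x == k then [x] else [] := by
          intro k; simp [List.filter_append, List.filter_cons]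
        simp only [List.flatMap_append, List.flatMap_cons, hfilt]
        have hl₁ : ∀ k ∈ l₁, (pvKey x == k) = false := by
          intro k hk; have := h₁₂ k hk (pvKey x) (by simp); simp; omega
        have hl₂ : ∀ k ∈ l₂, (pvKey x == k) = false := by
          intro k hk; have := h₂.1 k hk; simp; omega
        have e₁ : l₁.flatMap (fun k => p.filter (fun y => pvKey y == k) ++ if pvKey x == k then [x] else [])
            = l₁.flatMap (fun k => p.filter (fun y => pvKey y == k)) := by
          apply List.flatMap_congr; intro k hk; simp [hl₁ k hk]
        have e₂ : l₂.flatMap (fun k => p.filter (fun y => pvKey y == k) ++ if pvKey x == k then [x] else [])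
            = l₂.flatMap (fun k => p.filter (fun y => pvKey y == k)) := by
          apply List.flatMap_congr; intro k hk; simp [hl₂ k hk]
        rw [e₁, e₂]
        simp
      · -- nothing in the ≤-key part is strictly after x
        intro a ha
        simp only [List.mem_append] at ha
        rcases ha with ha | ha
        · obtain ⟨k, hk, hka⟩ := List.mem_flatMap.mp ha
          have hak : pvKey a = k := by
            have := List.of_mem_filter hka; simpa [beq_iff_eq] using this
          have := h₁₂ k hk (pvKey x) (by simp)
          simp [hak]; omega
        · have := List.of_mem_filter ha
          have hax : pvKey a = pvKey x := by simpa [beq_iff_eq] using this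
          simp [hax]
      · -- everything in the >-key part is strictly after x
        intro b hb
        obtain ⟨k, hk, hkb⟩ := List.mem_flatMap.mp hb
        have hbk : pvKey b = k := by
          have := List.of_mem_filter hkb; simpa [beq_iff_eq] using this
        have := h₂.1 k hk
        simp [hbk]; omega
    rw [hsplit, ih (p ++ [x]) (fun y hy => hcov y (by simp [hy]))]
    simp

-- pyRange 1 (n+1) 1 is strictly increasing
theorem pyRange_pairwise_lt (a b : Int) : (PySem.List.pyRange a b 1).Pairwise (· < ·) := by
  rw [PySem.List.pyRange_of_pos a b (by omega)]
  refine List.Pairwise.map _ ?_ (List.pairwise_lt_range)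
  intro p q hpq
  omega

-- ===== VERDICT (by name: the statement is the Claim_ definition above) =====
theorem order_items_by_task_index_py_spec : Claim_equal_order_items_by_task_index_py := by
  intro items ec _
  unfold Spec_order_items_by_task_index_py
  unfold order_items_by_task_index_py order_items_by_task_index_py_alt
  by_cases hall : (items.all (fun item => ((PySem.Dict.mk item).get? "task_index").isSome)) = true
  · rw [pvAltBuckets_some items hall PySem.Dict.empty]
    dsimp only
    have hkeys : (items.foldl pvStep PySem.Dict.empty).keys
        = PySem.Set.ofList (items.map pvKey) := by
      have h := PySem.Dict.keys_foldl_modify_key items pvKey ([] : List (List (String × Int)))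
          (fun _ x l => l ++ [x]) PySem.Dict.empty
      have he : List.foldl pvStep PySem.Dict.empty items
          = List.foldl (fun d x => d.modify (pvKey x) [] ((fun _ x l => l ++ [x]) d x)) PySem.Dict.empty items := rfl
      rw [he, h]; rfl
    have hmap : (items.map (fun item => (PySem.Dict.mk item).get? "task_index")).map (fun o => o.getD 0)
        = items.map pvKey := by
      simp only [List.map_map]; rfl
    have hc : ¬ ¬ ((items.map (fun item => (PySem.Dict.mk item).get? "task_index")).all (fun o => o.isSome)) = true := by
      simp only [List.all_map, Function.comp_def]
      exact not_not_intro hall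
    rw [if_neg hc, hmap, hkeys, PySem.Set.ofList_ofList]
    by_cases hset : PySem.Set.equal (PySem.Set.ofList (items.map pvKey))
        (PySem.Set.ofList (PySem.List.pyRange 1 (ec + 1) 1)) = true
    · rw [if_neg (by simpa using hset), if_neg (by simpa using hset)]
      have hcov : ∀ x ∈ items, pvKey x ∈ PySem.List.pyRange 1 (ec + 1) 1 := by
        intro x hx
        have h1 := (PySem.Set.equal_iff _ _).mp hset (pvKey x)
        rw [PySem.Set.mem_ofList, PySem.Set.mem_ofList] at h1
        exact h1.mp (List.mem_map_of_mem hx)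
      have hgetD : ∀ i : Int, (items.foldl pvStep PySem.Dict.empty).getD i []
          = items.filter (fun x => pvKey x == i) := by
        intro i; rw [getD_foldl_pvStep]; simp
      rw [PySem.List.foldl_append_eq_flatMap]
      have hcs := csort (PySem.List.pyRange 1 (ec + 1) 1) (pyRange_pairwise_lt 1 (ec + 1))
          items [] hcov
      simp only [List.filter_nil] at hcs
      have hfb : (PySem.List.pyRange 1 (ec + 1) 1).flatMap (fun _ => ([] : List (List (String × Int)))) = [] := by
        simp
      rw [hfb] at hcs
      rw [PySem.List.sorted_eq_foldl_insertBy]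
      show items.foldl (fun acc x => PySem.List.insertBy (fun a b => decide (pvKey a < pvKey b)) x acc) [] = _
      rw [hcs]
      simp only [List.nil_append]
      apply List.flatMap_congr
      intro k _
      rw [hgetD]
    · rw [if_pos (by simpa using hset), if_pos (by simpa using hset)]
  · rw [pvAltBuckets_none items hall PySem.Dict.empty]
    have hc : ¬ ((items.map (fun item => (PySem.Dict.mk item).get? "task_index")).all (fun o => o.isSome)) = true := by
      simp only [List.all_map, Function.comp_def]
      exact hall
    rw [if_pos hc]
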